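-- pv_equiv track=rewrite | github.com/Daisy777/algorithm_exercise | google questions/kick_start/2019_practice/kickstart_alarm.py | wakeup
-- ===== SOURCE A (Python) =====
-- def _wakeup(allcombinations, i):
--     sum = 0
--
--     for combination in allcombinations:
--         for index, ele in enumerate(combination):
--             sum += ele*(index+1)**i
--     return sum
--
-- def wakeup(A, K):
--     sum = 0
--
--     # calculate all combinations
--     alladjcent = []
--     def adjcent(arr, k):
--         for i in range(len(arr)-k+1):
--             yield arr[i:i+k]
--
--     for i in range(1, len(A)+1):
--         alladjcent.extend(list(adjcent(A, i)))
--
--     for i in range(1, K+1):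
--         sum += _wakeup(alladjcent, i)
--     return sum
-- ===== SOURCE B (Python) =====
-- def wakeup(A, K):
--     # Closed-form per-element contribution: A[j] occurs at in-subarray position
--     # p (1-based) in exactly (n - j) contiguous subarrays, for p = 1..j+1.
--     n = len(A)
--     total = 0
--     for i in range(1, K + 1):
--         prefix = 0  # sum of p**i for p = 1..j+1
--         for j, a in enumerate(A):
--             prefix += (j + 1) ** i
--             total += a * (n - j) * prefix
--     return total
-- ===== Notes on version B (the rewrite author's own statement) =====
-- stated objective: faster
-- what changed: Instead of materializing every contiguous subarray and summing element*(position)^i over all of them, B counts for each element A[j] how many subarrays place it at each 1-based position p (exactly n-j subarrays for each p=1..j+1) and sums a*(n-j)*prefix where prefix is the running sum of p**i.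
import Mathlib
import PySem

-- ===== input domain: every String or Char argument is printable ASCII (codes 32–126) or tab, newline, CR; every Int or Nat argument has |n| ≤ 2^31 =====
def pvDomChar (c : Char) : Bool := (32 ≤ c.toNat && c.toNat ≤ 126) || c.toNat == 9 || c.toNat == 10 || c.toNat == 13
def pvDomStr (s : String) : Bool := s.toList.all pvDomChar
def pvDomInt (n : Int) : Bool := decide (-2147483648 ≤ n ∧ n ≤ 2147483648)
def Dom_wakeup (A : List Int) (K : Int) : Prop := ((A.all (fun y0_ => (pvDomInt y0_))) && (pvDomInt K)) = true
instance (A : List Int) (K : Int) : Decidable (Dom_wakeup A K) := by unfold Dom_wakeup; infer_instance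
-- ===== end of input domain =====

-- B replaces A's enumeration of all contiguous subarrays by a closed-form per-element count (faster in a timing run).

-- ===== PORT A =====
-- port of _wakeup: sum over combinations of ele*(index+1)**i
def wakeupHelper (allcombinations : List (List Int)) (i : Int) : Int :=
  allcombinations.foldl
    (fun s comb =>
      (PySem.List.enumerate comb 0).foldl
        (fun s2 p => s2 + p.2 * (p.1 + 1) ^ i.toNat) s) 0

def wakeup (A : List Int) (K : Int) : Int :=
  -- alladjcent: for i in 1..len(A), all slices A[s:s+i]
  let alladjcent : List (List Int) :=
    (PySem.List.pyRange 1 ((A.length : Int) + 1) 1).foldl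
      (fun acc i =>
        acc ++ (PySem.List.pyRange 0 ((A.length : Int) - i + 1) 1).map
          (fun s => PySem.List.slice A (some s) (some (s + i)))) []
  (PySem.List.pyRange 1 (K + 1) 1).foldl
    (fun s i => s + wakeupHelper alladjcent i) 0

-- ===== PORT B =====
def wakeup_alt (A : List Int) (K : Int) : Int :=
  let n : Int := (A.length : Int)
  (PySem.List.pyRange 1 (K + 1) 1).foldl
    (fun total i =>
      ((PySem.List.enumerate A 0).foldl
        (fun (st : Int × Int) ja =>
          let pre := st.2 + (ja.1 + 1) ^ i.toNat
          (st.1 + ja.2 * (n - ja.1) * pre, pre))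
        (total, 0)).1) 0

-- ===== PRECONDITION & SPEC =====
def Spec_wakeup (A : List Int) (K : Int) (out : Int) : Prop := out = wakeup_alt A K
instance (A : List Int) (K : Int) (out : Int) : Decidable (Spec_wakeup A K out) := by unfold Spec_wakeup; infer_instance

-- ===== CLAIM (what is proved, stated in full; the proofs are below) =====
def Claim_equal_wakeup : Prop := ∀ (A : List Int) (K : Int), Dom_wakeup A K → Spec_wakeup A K (wakeup A K)

-- ===== LEMMAS AND PROOFS =====

-- sum of (s+u+1)^m for u = 0..t-1
def powSumFrom (s : Int) (m t : ℕ) : Int := ∑ u ∈ Finset.range t, (s + u + 1) ^ m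

-- value _wakeup assigns to a single combination, with enumeration starting at s
def wvalF (l : List Int) (s : Int) (m : ℕ) : Int :=
  ∑ t ∈ Finset.range l.length, l.getD t 0 * (s + t + 1) ^ m

lemma list_range_sum (q : ℕ) (f : ℕ → Int) :
    ((List.range q).map f).sum = ∑ k ∈ Finset.range q, f k := by
  induction q with
  | zero => simp
  | succ q ih => simp [List.range_succ, Finset.sum_range_succ, ih]

lemma foldl_shift {α : Type} (f : Int → α → Int) (g : α → Int)
    (h : ∀ a x, f a x = a + g x) (l : List α) (a : Int) :
    l.foldl f a = a + (l.map g).sum := by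
  induction l generalizing a with
  | nil => simp
  | cons x l ih => simp [h, ih (a + g x), add_assoc]

lemma powSumFrom_succ (s : Int) (m t : ℕ) :
    powSumFrom s m (t + 1) = (s + 1) ^ m + powSumFrom (s + 1) m t := by
  unfold powSumFrom
  rw [Finset.sum_range_succ']
  rw [add_comm]
  congr 1
  · norm_num
  · apply Finset.sum_congr rfl
    intro u _
    push_cast
    ring_nf

lemma wvalF_cons (x : Int) (l : List Int) (s : Int) (m : ℕ) :
    wvalF (x :: l) s m = x * (s + 1) ^ m + wvalF l (s + 1) m := by
  unfold wvalF
  simp only [List.length_cons]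
  rw [Finset.sum_range_succ']
  rw [add_comm]
  congr 1
  · simp
  · apply Finset.sum_congr rfl
    intro t _
    simp only [List.getD_cons_succ]
    push_cast
    ring_nf

lemma enum_map_sum (l : List Int) (s : Int) (m : ℕ) :
    ((PySem.List.enumerate l s).map (fun p => p.2 * (p.1 + 1) ^ m)).sum = wvalF l s m := by
  induction l generalizing s with
  | nil => simp [wvalF]
  | cons x l ih =>
    rw [PySem.List.enumerate_cons, wvalF_cons]
    simp [ih (s + 1)]

-- B's inner loop, characterized
lemma inner_fold (n : Int) (m : ℕ) (l : List Int) (s tot pre : Int) :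
    ((PySem.List.enumerate l s).foldl
      (fun (st : Int × Int) ja =>
        let p := st.2 + (ja.1 + 1) ^ m
        (st.1 + ja.2 * (n - ja.1) * p, p)) (tot, pre)).1
    = tot + ∑ t ∈ Finset.range l.length,
        l.getD t 0 * (n - (s + t)) * (pre + powSumFrom s m (t + 1)) := by
  induction l generalizing s tot pre with
  | nil => simp
  | cons x l ih =>
    rw [PySem.List.enumerate_cons]
    simp only [List.foldl_cons]
    rw [ih (s + 1) _ _]
    simp only [List.length_cons]
    rw [Finset.sum_range_succ']
    have h0 : powSumFrom s m 1 = (s + 1) ^ m := by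
      simp [powSumFrom]
    have hsum : ∀ t ∈ Finset.range l.length,
        (x :: l).getD (t + 1) 0 * (n - (s + ((t : Int) + 1))) * (pre + powSumFrom s m (t + 1 + 1))
        = l.getD t 0 * (n - (s + 1 + (t : Int))) * ((pre + (s + 1) ^ m) + powSumFrom (s + 1) m (t + 1)) := by
      intro t _
      rw [powSumFrom_succ s m (t + 1)]
      simp only [List.getD_cons_succ]
      ring_nf
    push_cast
    rw [Finset.sum_congr rfl hsum]
    simp only [List.getD_cons_zero, h0]
    ring

-- foldl-append flattening
lemma map_sum_foldl_append {α : Type} (l : List α) (h : α → List (List Int))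
    (f : List Int → Int) (init : List (List Int)) :
    ((l.foldl (fun acc x => acc ++ h x) init).map f).sum
      = (init.map f).sum + (l.map (fun x => ((h x).map f).sum)).sum := by
  induction l generalizing init with
  | nil => simp
  | cons x l ih =>
    simp only [List.foldl_cons]
    rw [ih (init ++ h x)]
    simp [add_assoc]

lemma tri_count (M : ℕ) (g : ℕ → Int) :
    ∑ l ∈ Finset.range M, ∑ t ∈ Finset.range (l + 1), g t
      = ∑ t ∈ Finset.range M, ((M - t : ℕ) : Int) * g t := by
  induction M with
  | zero => simp
  | succ M ih =>
    rw [Finset.sum_range_succ, ih]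
    have h1 : ∀ t ∈ Finset.range M,
        ((M + 1 - t : ℕ) : Int) * g t = ((M - t : ℕ) : Int) * g t + g t := by
      intro t ht
      have ht' : t < M := Finset.mem_range.mp ht
      have h2 : (M + 1 - t : ℕ) = (M - t) + 1 := by omega
      rw [h2]
      push_cast
      ring
    rw [Finset.sum_range_succ (fun t => ((M + 1 - t : ℕ) : Int) * g t) M]
    rw [Finset.sum_congr rfl h1, Finset.sum_add_distrib]
    rw [Finset.sum_range_succ g M, Nat.add_sub_cancel_left]
    push_cast
    ring

lemma range_sub_sum (n a : ℕ) (g : ℕ → Int) :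
    ∑ b ∈ Finset.range (n - a), g b
      = ∑ b ∈ Finset.range n, if a + b < n then g b else 0 := by
  rw [← Finset.sum_filter]
  congr 1
  ext b
  simp
  omega

lemma tri_swap (n : ℕ) (g : ℕ → ℕ → Int) :
    ∑ a ∈ Finset.range n, ∑ b ∈ Finset.range (n - a), g a b
      = ∑ b ∈ Finset.range n, ∑ a ∈ Finset.range (n - b), g a b := by
  have h1 : ∀ a, ∑ b ∈ Finset.range (n - a), g a b
      = ∑ b ∈ Finset.range n, if a + b < n then g a b else 0 :=
    fun a => range_sub_sum n a (g a)
  have h2 : ∀ b, ∑ a ∈ Finset.range (n - b), g a b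
      = ∑ a ∈ Finset.range n, if b + a < n then g a b else 0 :=
    fun b => range_sub_sum n b (fun a => g a b)
  simp only [h1, h2]
  rw [Finset.sum_comm]
  apply Finset.sum_congr rfl
  intro b _
  apply Finset.sum_congr rfl
  intro a _
  have h3 : a + b < n ↔ b + a < n := by omega
  split_ifs with hc hd hd
  · rfl
  · exact absurd (h3.mp hc) hd
  · exact absurd (h3.mpr hd) hc
  · rfl

lemma tri_reindex (n : ℕ) (G : ℕ → ℕ → Int) :
    ∑ s ∈ Finset.range n, ∑ t ∈ Finset.range (n - s), G s t
      = ∑ j ∈ Finset.range n, ∑ t ∈ Finset.range (j + 1), G (j - t) t := by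
  induction n with
  | zero => simp
  | succ n ih =>
    rw [Finset.sum_range_succ, Finset.sum_range_succ]
    have hsplit : ∀ s ∈ Finset.range n,
        ∑ t ∈ Finset.range (n + 1 - s), G s t
          = ∑ t ∈ Finset.range (n - s), G s t + G s (n - s) := by
      intro s hs
      have hs' : s < n := Finset.mem_range.mp hs
      have h1 : n + 1 - s = (n - s) + 1 := by omega
      rw [h1, Finset.sum_range_succ]
    rw [Finset.sum_congr rfl hsplit, Finset.sum_add_distrib, ih]
    have hn1 : n + 1 - n = 1 := by omega
    rw [hn1, Finset.sum_range_one]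
    have hrefl : ∑ s ∈ Finset.range n, G s (n - s) + G n 0
        = ∑ t ∈ Finset.range (n + 1), G (n - t) t := by
      have hnn : G n 0 = (fun s => G s (n - s)) n := by simp
      rw [hnn, ← Finset.sum_range_succ (fun s => G s (n - s)) n]
      rw [← Finset.sum_range_reflect (fun s => G s (n - s)) (n + 1)]
      apply Finset.sum_congr rfl
      intro t ht
      have ht' : t < n + 1 := Finset.mem_range.mp ht
      have h1 : n + 1 - 1 - t = n - t := by omega
      have h2 : n - (n - t) = t := by omega
      simp only [h1, h2]
    rw [add_assoc, hrefl]

lemma pyRange_map_sum (a b : Int) (f : Int → Int) :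
    ((PySem.List.pyRange a b 1).map f).sum = ∑ k ∈ Finset.range (b - a).toNat, f (a + k) := by
  rw [PySem.List.pyRange_one, List.map_map, list_range_sum]
  rfl

lemma wvalF_slice (A : List Int) (s l m : ℕ) (h : s + l ≤ A.length) :
    wvalF ((A.drop s).take l) 0 m
      = ∑ t ∈ Finset.range l, A.getD (s + t) 0 * ((t : Int) + 1) ^ m := by
  unfold wvalF
  have hlen : ((A.drop s).take l).length = l := by
    simp
    omega
  rw [hlen]
  apply Finset.sum_congr rfl
  intro t ht
  have ht' : t < l := Finset.mem_range.mp ht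
  have hg : ((A.drop s).take l).getD t 0 = A.getD (s + t) 0 := by
    simp [List.getD, ht', List.getElem?_drop]
  rw [hg]
  ring_nf

lemma helper_reduce (allc : List (List Int)) (i : Int) :
    wakeupHelper allc i = ((allc.map (fun comb => wvalF comb 0 i.toNat)).sum) := by
  unfold wakeupHelper
  rw [foldl_shift _ (fun comb => wvalF comb 0 i.toNat)
    (fun a comb => by rw [PySem.List.foldl_add, enum_map_sum])]
  simp

-- the per-exponent combinatorial identity: subarray enumeration = per-element count
lemma triple_ident (A : List Int) (m : ℕ) :
    (∑ k ∈ Finset.range A.length, ∑ s ∈ Finset.range (A.length - k),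
        ∑ t ∈ Finset.range (k + 1), A.getD (s + t) 0 * ((t : Int) + 1) ^ m)
      = ∑ j ∈ Finset.range A.length,
          A.getD j 0 * ((A.length : Int) - j) * powSumFrom 0 m (j + 1) := by
  set n := A.length with hn
  rw [tri_swap n (fun k s => ∑ t ∈ Finset.range (k + 1), A.getD (s + t) 0 * ((t : Int) + 1) ^ m)]
  have hcount : ∀ s ∈ Finset.range n,
      (∑ k ∈ Finset.range (n - s), ∑ t ∈ Finset.range (k + 1), A.getD (s + t) 0 * ((t : Int) + 1) ^ m)
        = ∑ t ∈ Finset.range (n - s), ((n - s - t : ℕ) : Int) * (A.getD (s + t) 0 * ((t : Int) + 1) ^ m) := by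
    intro s _
    exact tri_count (n - s) (fun t => A.getD (s + t) 0 * ((t : Int) + 1) ^ m)
  rw [Finset.sum_congr rfl hcount]
  rw [tri_reindex n (fun s t => ((n - s - t : ℕ) : Int) * (A.getD (s + t) 0 * ((t : Int) + 1) ^ m))]
  apply Finset.sum_congr rfl
  intro j hj
  have hj' : j < n := Finset.mem_range.mp hj
  have hstep : ∀ t ∈ Finset.range (j + 1),
      ((n - (j - t) - t : ℕ) : Int) * (A.getD ((j - t) + t) 0 * ((t : Int) + 1) ^ m)
        = ((n : Int) - j) * (A.getD j 0 * ((t : Int) + 1) ^ m) := by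
    intro t ht
    have ht' : t < j + 1 := Finset.mem_range.mp ht
    have h1 : (j - t) + t = j := by omega
    have h2 : (n - (j - t) - t : ℕ) = n - j := by omega
    have h3 : ((n - j : ℕ) : Int) = (n : Int) - j := by omega
    rw [h1, h2, h3]
  rw [Finset.sum_congr rfl hstep, ← Finset.mul_sum, ← Finset.mul_sum]
  unfold powSumFrom
  have h4 : ∀ u ∈ Finset.range (j + 1), ((0 : Int) + u + 1) ^ m = ((u : Int) + 1) ^ m := by
    intro u _
    ring_nf
  rw [Finset.sum_congr rfl h4]
  ring

lemma helper_eq (A : List Int) (i : Int) :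
    wakeupHelper
      ((PySem.List.pyRange 1 ((A.length : Int) + 1) 1).foldl
        (fun acc i =>
          acc ++ (PySem.List.pyRange 0 ((A.length : Int) - i + 1) 1).map
            (fun s => PySem.List.slice A (some s) (some (s + i)))) []) i
    = ∑ j ∈ Finset.range A.length,
        A.getD j 0 * ((A.length : Int) - j) * powSumFrom 0 i.toNat (j + 1) := by
  rw [helper_reduce]
  rw [map_sum_foldl_append]
  simp only [List.map_nil, List.sum_nil, zero_add]
  rw [pyRange_map_sum]
  have hb : (((A.length : Int) + 1) - 1).toNat = A.length := by omega
  rw [hb]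
  rw [← triple_ident A i.toNat]
  apply Finset.sum_congr rfl
  intro k hk
  have hk' : k < A.length := Finset.mem_range.mp hk
  rw [List.map_map, pyRange_map_sum]
  have hb2 : (((A.length : Int) - (1 + k) + 1) - 0).toNat = A.length - k := by omega
  rw [hb2]
  apply Finset.sum_congr rfl
  intro s hs
  have hs' : s < A.length - k := Finset.mem_range.mp hs
  simp only [Function.comp_apply]
  have e1 : (0 : Int) + (s : Int) = ((s : ℕ) : Int) := by omega
  have e2 : (s : Int) + (1 + (k : Int)) = ((s : ℕ) : Int) + ((k + 1 : ℕ) : Int) := by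
    push_cast
    ring
  rw [e1, e2, PySem.List.slice_natCast_add]
  rw [wvalF_slice A s (k + 1) i.toNat (by omega)]

lemma alt_step (A : List Int) (i tot : Int) :
    ((PySem.List.enumerate A 0).foldl
        (fun (st : Int × Int) ja =>
          let pre := st.2 + (ja.1 + 1) ^ i.toNat
          (st.1 + ja.2 * ((A.length : Int) - ja.1) * pre, pre))
        (tot, 0)).1
    = tot + ∑ j ∈ Finset.range A.length,
        A.getD j 0 * ((A.length : Int) - j) * powSumFrom 0 i.toNat (j + 1) := by
  rw [inner_fold ((A.length : Int)) i.toNat A 0 tot 0]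
  congr 1
  apply Finset.sum_congr rfl
  intro j _
  ring_nf

-- ===== VERDICT (by name: the statement is the Claim_ definition above) =====
set_option maxHeartbeats 1000000 in
theorem wakeup_spec : Claim_equal_wakeup := by
  intro A K _
  simp only [Spec_wakeup, wakeup, wakeup_alt]
  rw [foldl_shift _ (fun i => wakeupHelper
      ((PySem.List.pyRange 1 ((A.length : Int) + 1) 1).foldl
        (fun acc i =>
          acc ++ (PySem.List.pyRange 0 ((A.length : Int) - i + 1) 1).map
            (fun s => PySem.List.slice A (some s) (some (s + i)))) []) i)
    (fun a x => rfl)]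
  rw [foldl_shift _ (fun i => ∑ j ∈ Finset.range A.length,
        A.getD j 0 * ((A.length : Int) - j) * powSumFrom 0 i.toNat (j + 1))
    (fun a x => alt_step A x a)]
  congr 1
  exact congrArg List.sum (List.map_congr_left (fun i _ => helper_eq A i))
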